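-- pv_equiv track=rewrite | github.com/robas/tf-utils | tc_parser.py | filterTC
-- ===== SOURCE A (Python) =====
-- TCR0 = "0"
--
-- def filterTC(tcs, tc):
--     result = []
--     currentTCR = {}
--     toAppendTC = {}
--     i = 0
--
--     while i < len(tcs):
--         currentTCR = dict(tcs[i])
--
--         if currentTCR.get("Transaction Code") != tc:
--             if toAppendTC:
--                 result.append(toAppendTC)
--                 toAppendTC = {}
--             i = i + 1
--             continue
--
--         if currentTCR.get("Transaction Component Sequence Number") == TCR0:
--             if toAppendTC:
--                 result.append(toAppendTC)
--                 toAppendTC = {}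
--             toAppendTC = currentTCR
--         else:
--             toAppendTC = mergeDicts(toAppendTC, currentTCR)
--         i = i + 1
--
--     if toAppendTC:
--         result.append(toAppendTC)
--
--     return result
--
-- def mergeDicts(x, y):
--     for k in y:
--         v = y[k]
--         if k in x:
--             tcr = y.get("Transaction Component Sequence Number")
--             x[k+tcr] = v
--         else:
--             x[k] = v
--     #z = x.copy()
--     # z.update(y)
--     return x
-- ===== SOURCE B (Python) =====
-- TCR0 = "0"
--
-- def mergeDicts(x, y):
--     for k in y:
--         v = y[k]
--         if k in x:
--             tcr = y.get("Transaction Component Sequence Number")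
--             x[k+tcr] = v
--         else:
--             x[k] = v
--     return x
--
-- def _mergeGroup(g):
--     acc = {}
--     for rec in g:
--         acc = mergeDicts(acc, rec)
--     return acc
--
-- def filterTC(tcs, tc):
--     # partition into groups of consecutive matching records, then merge each group
--     groups = []
--     group = []
--     for r in tcs:
--         rec = dict(r)
--         if rec.get("Transaction Code") != tc:
--             if group:
--                 groups.append(group)
--             group = []
--         elif rec.get("Transaction Component Sequence Number") == TCR0:
--             if group:
--                 groups.append(group)
--             group = [rec]
--         else:
--             group.append(rec)
--     if group:
--         groups.append(group)
--     return [_mergeGroup(g) for g in groups]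
-- ===== Notes on version B (the rewrite author's own statement) =====
-- stated objective: alternative
-- what changed: Instead of A's index-driven while loop that merges each record inline into a running accumulator dict, B makes one pass that only partitions the records into groups of consecutive matching records, and then produces each output dict by folding the unchanged mergeDicts over its group starting from {}.
import Mathlib
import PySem

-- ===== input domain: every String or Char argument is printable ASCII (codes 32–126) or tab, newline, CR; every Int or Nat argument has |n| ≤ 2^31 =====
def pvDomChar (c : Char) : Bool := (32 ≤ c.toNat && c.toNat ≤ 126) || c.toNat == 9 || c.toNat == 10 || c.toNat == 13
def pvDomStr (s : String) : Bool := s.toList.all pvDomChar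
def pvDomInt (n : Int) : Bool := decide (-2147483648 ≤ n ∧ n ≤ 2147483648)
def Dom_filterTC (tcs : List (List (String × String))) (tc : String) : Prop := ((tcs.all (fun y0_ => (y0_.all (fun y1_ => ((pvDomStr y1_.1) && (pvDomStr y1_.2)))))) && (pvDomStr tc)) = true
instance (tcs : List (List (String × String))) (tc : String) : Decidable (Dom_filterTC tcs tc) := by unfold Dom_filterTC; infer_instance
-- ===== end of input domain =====

-- B partitions the records into groups of consecutive matching records in one pass and then merges
-- each group by folding the unchanged mergeDicts, instead of A's inline-merging while loop
-- (objective: alternative decomposition; same cost; return values only — A/B mutate only fresh copies).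

def pvCODE : String := "Transaction Code"
def pvSEQ : String := "Transaction Component Sequence Number"

-- ===== PORT A =====
-- mergeDicts(x, y): for k in y: if k in x: x[k + y.get(SEQ)] = y[k] else x[k] = y[k]; return x.
-- When the collision branch fires and y lacks the SEQ key, Python raises TypeError (k + None);
-- those inputs are excluded by Pre_filterTC below, so the `.getD ""` default is never reached there.
def mergeDictsP (x y : PySem.Dict String String) : PySem.Dict String String :=
  y.items.foldl (fun x kv =>
    if x.contains kv.1 then
      x.insert (kv.1 ++ ((y.get? pvSEQ).getD "")) kv.2
    else
      x.insert kv.1 kv.2) x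

-- `if toAppendTC: result.append(toAppendTC); toAppendTC = {}` — A's flush, repeated three times
def pvFlushA (result : List (PySem.Dict String String)) (ta : PySem.Dict String String) : List (PySem.Dict String String) :=
  if ta.items.isEmpty then result else result ++ [ta]

-- A's while loop over i, with state (result, toAppendTC); `if toAppendTC:` is the nonemptiness test
def filterTCLoop (tc : String) : List (List (String × String)) → List (PySem.Dict String String) → PySem.Dict String String → List (PySem.Dict String String)
  | [], result, ta => pvFlushA result ta
  | r :: rest, result, ta =>
    let cur := PySem.Dict.ofList r
    if cur.get? pvCODE ≠ some tc then
      filterTCLoop tc rest (pvFlushA result ta) PySem.Dict.empty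
    else if cur.get? pvSEQ = some "0" then
      filterTCLoop tc rest (pvFlushA result ta) cur
    else
      filterTCLoop tc rest result (mergeDictsP ta cur)

def filterTC (tcs : List (List (String × String))) (tc : String) : List (List (String × String)) :=
  (filterTCLoop tc tcs [] PySem.Dict.empty).map (·.items)

-- ===== PORT B =====
-- `if group: groups.append(group)` — B's flush of the pending group of records
def pvFlushB (groups : List (List (PySem.Dict String String))) (group : List (PySem.Dict String String)) : List (List (PySem.Dict String String)) :=
  if group.isEmpty then groups else groups ++ [group]

-- _mergeGroup(g): fold mergeDicts over the group's records starting from {}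
def mergeGroupP (g : List (PySem.Dict String String)) : PySem.Dict String String :=
  g.foldl mergeDictsP PySem.Dict.empty

-- B's for loop: state (groups, group); only partitions, no merging
def groupLoop (tc : String) : List (List (String × String)) → List (List (PySem.Dict String String)) → List (PySem.Dict String String) → List (List (PySem.Dict String String))
  | [], groups, group => pvFlushB groups group
  | r :: rest, groups, group =>
    let recd := PySem.Dict.ofList r
    if recd.get? pvCODE ≠ some tc then
      groupLoop tc rest (pvFlushB groups group) []
    else if recd.get? pvSEQ = some "0" then
      groupLoop tc rest (pvFlushB groups group) [recd]
    else
      groupLoop tc rest groups (group ++ [recd])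

def filterTC_alt (tcs : List (List (String × String))) (tc : String) : List (List (String × String)) :=
  (groupLoop tc tcs [] []).map (fun g => (mergeGroupP g).items)

-- ===== PRECONDITION & SPEC =====
-- Pre_ excludes exactly the inputs on which Python A raises TypeError (k + None in mergeDicts):
-- a record matching tc while lacking the sequence key, immediately after another record matching tc.
def Pre_filterTC (tcs : List (List (String × String))) (tc : String) : Prop :=
  ∀ p ∈ tcs.zip tcs.tail,
    ¬((PySem.Dict.ofList p.1).get? pvCODE = some tc ∧
      (PySem.Dict.ofList p.2).get? pvCODE = some tc ∧
      (PySem.Dict.ofList p.2).contains pvSEQ = false)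
instance (tcs : List (List (String × String))) (tc : String) : Decidable (Pre_filterTC tcs tc) := by unfold Pre_filterTC; infer_instance

def pvWitness_filterTC : (List (List (String × String))) × String :=
  ([[("Transaction Code", "05"), ("Transaction Component Sequence Number", "0")],
    [("Transaction Code", "05"), ("Transaction Component Sequence Number", "1"), ("a", "x")],
    [("Transaction Code", "06")]], "05")

def Spec_filterTC (tcs : List (List (String × String))) (tc : String) (out : List (List (String × String))) : Prop := out = filterTC_alt tcs tc
instance (tcs : List (List (String × String))) (tc : String) (out : List (List (String × String))) : Decidable (Spec_filterTC tcs tc out) := by unfold Spec_filterTC; infer_instance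

-- ===== CLAIM (what is proved, stated in full; the proofs are below) =====
def Claim_equal_filterTC : Prop := ∀ (tcs : List (List (String × String))) (tc : String), Dom_filterTC tcs tc → Pre_filterTC tcs tc → Spec_filterTC tcs tc (filterTC tcs tc)

-- ===== LEMMAS AND PROOFS =====

theorem pv_insert_items_ne (d : PySem.Dict String String) (k v : String) :
    (d.insert k v).items ≠ [] := by
  rw [PySem.Dict.items_insert]
  split
  · rename_i h
    intro hn
    rw [List.map_eq_nil_iff] at hn
    obtain ⟨l⟩ := d
    simp at hn; subst hn
    simp [PySem.Dict.contains] at h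
  · simp

-- fresh distinct keys inserted into x just append (the no-collision run of mergeDicts)
theorem pv_aux (tcr : String) :
    ∀ (l : List (String × String)) (x : PySem.Dict String String),
      (l.map (·.1)).Nodup → (∀ kv ∈ l, x.contains kv.1 = false) →
      (l.foldl (fun x kv => if x.contains kv.1 then x.insert (kv.1 ++ tcr) kv.2 else x.insert kv.1 kv.2) x).items
        = x.items ++ l := by
  intro l
  induction l with
  | nil => intro x _ _; simp
  | cons kv t ih =>
    intro x hnd hc
    have hck : x.contains kv.1 = false := hc kv (by simp)
    simp only [List.foldl_cons, hck, if_false, Bool.false_eq_true]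
    rw [ih (x.insert kv.1 kv.2) (by simpa [List.nodup_cons] using hnd.of_cons) ?_]
    · rw [PySem.Dict.items_insert_of_not_contains (h := hck)]
      simp
    · intro kv' hkv'
      rw [PySem.Dict.contains_insert]
      have h1 : kv'.1 ≠ kv.1 := by
        simp only [List.map_cons, List.nodup_cons] at hnd
        intro e
        exact hnd.1 (e ▸ List.mem_map_of_mem hkv')
      have h2 := hc kv' (by simp [hkv'])
      simp [h1, h2]

-- mergeDicts({}, y) = y: Python's merge into an empty dict is a plain copy
theorem pv_merge_empty (y : PySem.Dict String String) (h : y.keys.Nodup) :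
    mergeDictsP PySem.Dict.empty y = y := by
  apply PySem.Dict.ext
  unfold mergeDictsP
  rw [pv_aux _ y.items PySem.Dict.empty (by simpa [PySem.Dict.keys] using h)
      (fun kv _ => PySem.Dict.contains_empty kv.1)]
  simp [PySem.Dict.empty]

theorem pv_foldl_ne (l : List (String × String)) (f : PySem.Dict String String → String × String → PySem.Dict String String)
    (hf : ∀ x kv, (f x kv).items ≠ []) :
    ∀ (x : PySem.Dict String String), x.items ≠ [] ∨ l ≠ [] → (l.foldl f x).items ≠ [] := by
  induction l with
  | nil => intro x h; simpa using h.resolve_right (by simp)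
  | cons kv t ih => intro x _; exact ih (f x kv) (Or.inl (hf x kv))

theorem pv_merge_ne (x y : PySem.Dict String String) (h : x.items ≠ [] ∨ y.items ≠ []) :
    (mergeDictsP x y).items ≠ [] := by
  unfold mergeDictsP
  exact pv_foldl_ne _ _ (fun x kv => by split <;> exact pv_insert_items_ne _ _ _) x h

theorem pv_get?_items_ne (d : PySem.Dict String String) (k v : String) (h : d.get? k = some v) :
    d.items ≠ [] := by
  intro hnil
  obtain ⟨l⟩ := d
  simp at hnil; subst hnil
  simp [PySem.Dict.get?] at h

theorem pv_foldl_merge_ne (t : List (PySem.Dict String String)) :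
    ∀ (x : PySem.Dict String String), x.items ≠ [] → ((t.foldl mergeDictsP x).items ≠ []) := by
  induction t with
  | nil => intro x hx; simpa using hx
  | cons e t ih => intro x hx; exact ih (mergeDictsP x e) (pv_merge_ne _ _ (Or.inl hx))

theorem pv_mergeGroup_ne (g : List (PySem.Dict String String))
    (h : ∀ d ∈ g, d.items ≠ []) (hg : g ≠ []) : (mergeGroupP g).items ≠ [] := by
  match g with
  | d :: t =>
    unfold mergeGroupP
    simp only [List.foldl_cons]
    exact pv_foldl_merge_ne t _ (pv_merge_ne _ _ (Or.inr (h d (by simp))))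

theorem pv_mergeGroup_append (g : List (PySem.Dict String String)) (d : PySem.Dict String String) :
    mergeGroupP (g ++ [d]) = mergeDictsP (mergeGroupP g) d := by
  simp [mergeGroupP]

-- A's flush of the accumulator IS B's flush of the group, merged (key invariant: a nonempty
-- group of records that all carry the code key merges to a nonempty dict)
theorem pv_flush_eq (tc : String) (groups : List (List (PySem.Dict String String)))
    (group : List (PySem.Dict String String)) (h : ∀ d ∈ group, d.get? pvCODE = some tc) :
    pvFlushA (groups.map mergeGroupP) (mergeGroupP group) = (pvFlushB groups group).map mergeGroupP := by
  match group with
  | [] => simp [pvFlushA, pvFlushB, mergeGroupP, PySem.Dict.empty]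
  | d :: t =>
    have hne : (mergeGroupP (d :: t)).items ≠ [] :=
      pv_mergeGroup_ne _ (fun d' hd' => pv_get?_items_ne _ _ _ (h d' hd')) (by simp)
    unfold pvFlushA pvFlushB
    rw [if_neg (by simpa [List.isEmpty_iff] using hne), if_neg (by simp)]
    simp

-- loop invariant: A's accumulator is the merge of B's pending group, A's result is the merge of B's groups
theorem pv_loop_eq (tc : String) :
    ∀ (tcs : List (List (String × String))) (groups : List (List (PySem.Dict String String)))
      (group : List (PySem.Dict String String)),
      (∀ d ∈ group, d.get? pvCODE = some tc) →
      filterTCLoop tc tcs (groups.map mergeGroupP) (mergeGroupP group) =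
        (groupLoop tc tcs groups group).map mergeGroupP := by
  intro tcs
  induction tcs with
  | nil => intro groups group h; exact pv_flush_eq tc groups group h
  | cons r rest ih =>
    intro groups group h
    simp only [filterTCLoop, groupLoop]
    by_cases hm : (PySem.Dict.ofList r : PySem.Dict String String).get? pvCODE = some tc
    · simp only [if_neg (not_not_intro hm)]
      by_cases hz : (PySem.Dict.ofList r : PySem.Dict String String).get? pvSEQ = some "0"
      · simp only [if_pos hz]
        rw [pv_flush_eq tc groups group h]
        have hc : mergeGroupP [PySem.Dict.ofList r] = (PySem.Dict.ofList r : PySem.Dict String String) :=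
          pv_merge_empty _ (PySem.Dict.nodup_keys_ofList r)
        have hih := ih (pvFlushB groups group) [PySem.Dict.ofList r]
          (by intro d hd; simp at hd; subst hd; simpa using hm)
        rw [hc] at hih
        exact hih
      · simp only [if_neg hz]
        rw [show mergeDictsP (mergeGroupP group) (PySem.Dict.ofList r)
              = mergeGroupP (group ++ [PySem.Dict.ofList r]) from (pv_mergeGroup_append _ _).symm]
        refine ih groups _ ?_
        intro d hd
        rcases List.mem_append.mp hd with hd | hd
        · exact h d hd
        · simp at hd; subst hd; exact hm
    · simp only [if_pos hm]
      rw [pv_flush_eq tc groups group h,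
          show (PySem.Dict.empty : PySem.Dict String String) = mergeGroupP [] from rfl]
      exact ih _ [] (by intro d hd; cases hd)

-- ===== VERDICT (by name: the statement is the Claim_ definition above) =====
theorem filterTC_spec : Claim_equal_filterTC := by
  intro tcs tc _hdom _hpre
  unfold Spec_filterTC filterTC filterTC_alt
  have h := pv_loop_eq tc tcs [] [] (by intro d hd; cases hd)
  simp only [List.map_nil] at h
  rw [show (PySem.Dict.empty : PySem.Dict String String) = mergeGroupP [] from rfl, h, List.map_map]
  rfl
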